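-- pv_equiv track=rewrite | github.com/zhuxiangqun/RANGEN-V2 | stage2_simple_backup_20250908_194842/domain_manager.py | _aggregate_keywords_by_domain
-- ===== SOURCE A (Python) =====
-- from typing import Dict, List, Any, Optional, Callable
--
-- def _aggregate_keywords_by_domain(batch_results: Dict[str, Any]) -> Dict[str, List[str]]:
--     """
--     按领域聚合关键词
--     """
--     domain_keywords = {}
--
--     for item in batch_results.get('discovered_keywords', []):
--         domain = item['domain']
--         keyword = item['keyword']
--
--         if domain not in domain_keywords:
--             domain_keywords[domain] = []
--
--         if keyword not in domain_keywords[domain]: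
--             domain_keywords[domain].append(keyword)
--
--     return domain_keywords
-- ===== SOURCE B (Python) =====
-- def _aggregate_keywords_by_domain(batch_results):
--     """
--     Two-phase: first group ALL keywords per domain (duplicates kept), then
--     deduplicate each group preserving first-occurrence order.
--     """
--     grouped = {}
--     for item in batch_results.get('discovered_keywords', []):
--         d = item['domain']
--         grouped[d] = grouped.get(d, []) + [item['keyword']]
--     return {d: list(dict.fromkeys(kws)) for d, kws in grouped.items()}
-- ===== Notes on version B (the rewrite author's own statement) =====
-- stated objective: alternative
-- what changed: A interleaves grouping and dedup in one scan with an inline membership test before each append; B first materializes a domain -> all-keywords table in one pass and then dedups each list (dict.fromkeys) in a separate pass over the table.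
import Mathlib
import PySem

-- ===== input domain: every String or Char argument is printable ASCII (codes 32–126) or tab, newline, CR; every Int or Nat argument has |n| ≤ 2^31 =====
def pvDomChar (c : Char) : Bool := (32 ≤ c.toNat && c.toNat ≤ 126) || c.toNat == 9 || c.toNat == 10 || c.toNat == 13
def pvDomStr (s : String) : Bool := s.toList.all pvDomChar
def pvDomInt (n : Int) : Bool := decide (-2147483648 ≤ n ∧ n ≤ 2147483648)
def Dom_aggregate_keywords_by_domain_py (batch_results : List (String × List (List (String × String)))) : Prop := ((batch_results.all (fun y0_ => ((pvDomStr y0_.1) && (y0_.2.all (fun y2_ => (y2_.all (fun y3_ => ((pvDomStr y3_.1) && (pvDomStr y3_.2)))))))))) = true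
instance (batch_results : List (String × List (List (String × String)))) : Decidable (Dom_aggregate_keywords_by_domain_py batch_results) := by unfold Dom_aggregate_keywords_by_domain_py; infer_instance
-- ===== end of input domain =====

-- B separates aggregation (one grouping pass keeping duplicates) from deduplication (a second pass
-- over the grouped table); same cost, different decomposition.

-- ===== PORT A =====
-- A's single scan: ensure the domain's list exists, then append the keyword only if absent.
-- item['domain'] / item['keyword'] raise KeyError when missing: those inputs are excluded by Pre_
-- (the `| _, _ => dk` branch is never reached under Pre_).
def aggregate_keywords_by_domain_py (batch_results : List (String × List (List (String × String)))) : List (String × List String) :=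
  ((((PySem.Dict.mk batch_results).getD "discovered_keywords" []).foldl (fun dk item =>
      match (PySem.Dict.mk item).get? "domain", (PySem.Dict.mk item).get? "keyword" with
      | some domain, some keyword =>
        let dk := if dk.contains domain then dk else dk.insert domain ([] : List String)
        if keyword ∈ dk.getD domain [] then dk else dk.insert domain (dk.getD domain [] ++ [keyword])
      | _, _ => dk)
    PySem.Dict.empty)).items

-- ===== PORT B =====
-- B's two passes: group ALL keywords per domain (duplicates kept), then dedup each group
-- (list(dict.fromkeys(kws)) = PySem.List.dedup).
def aggregate_keywords_by_domain_py_alt (batch_results : List (String × List (List (String × String)))) : List (String × List String) :=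
  let grouped := (((PySem.Dict.mk batch_results).getD "discovered_keywords" []).foldl (fun g item =>
      match (PySem.Dict.mk item).get? "domain" with
      | none => g
      | some domain =>
        match (PySem.Dict.mk item).get? "keyword" with
        | none => g
        | some keyword => g.insert domain (g.getD domain [] ++ [keyword]))
    PySem.Dict.empty)
  grouped.items.map (fun p => (p.1, PySem.List.dedup p.2))

-- ===== PRECONDITION & SPEC =====
-- Pre_ excludes exactly the inputs on which Python A raises KeyError: an item dict in the
-- 'discovered_keywords' list missing the 'domain' or 'keyword' key (B raises KeyError there too).
def Pre_aggregate_keywords_by_domain_py (batch_results : List (String × List (List (String × String)))) : Prop :=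
  ∀ item ∈ (PySem.Dict.mk batch_results).getD "discovered_keywords" [],
    ((PySem.Dict.mk item).get? "domain").isSome ∧ ((PySem.Dict.mk item).get? "keyword").isSome

instance (batch_results : List (String × List (List (String × String)))) : Decidable (Pre_aggregate_keywords_by_domain_py batch_results) := by unfold Pre_aggregate_keywords_by_domain_py; infer_instance

def pvWitness_aggregate_keywords_by_domain_py : (List (String × List (List (String × String)))) :=
  [("discovered_keywords", [[("domain", "tech"), ("keyword", "ai")], [("domain", "tech"), ("keyword", "ai")], [("domain", "bio"), ("keyword", "gene")]])]

def Spec_aggregate_keywords_by_domain_py (batch_results : List (String × List (List (String × String)))) (out : List (String × List String)) : Prop := out = aggregate_keywords_by_domain_py_alt batch_results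
instance (batch_results : List (String × List (List (String × String)))) (out : List (String × List String)) : Decidable (Spec_aggregate_keywords_by_domain_py batch_results out) := by unfold Spec_aggregate_keywords_by_domain_py; infer_instance

-- ===== CLAIM (what is proved, stated in full; the proofs are below) =====
def Claim_equal_aggregate_keywords_by_domain_py : Prop := ∀ (batch_results : List (String × List (List (String × String)))), Dom_aggregate_keywords_by_domain_py batch_results → Pre_aggregate_keywords_by_domain_py batch_results → Spec_aggregate_keywords_by_domain_py batch_results (aggregate_keywords_by_domain_py batch_results)

-- ===== LEMMAS AND PROOFS =====

-- The value-list relation preserves keys.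
theorem pvKeys_eq (dA dB : PySem.Dict String (List String))
    (hrel : dA.items = dB.items.map (fun p => (p.1, PySem.List.dedup p.2))) :
    dA.keys = dB.keys := by
  simp only [PySem.Dict.keys, hrel, List.map_map]
  rfl

-- One loop step preserves the invariant "A's dict is B's dict with every value list deduplicated".
theorem pvStep_rel (dom kw : String) (dA dB : PySem.Dict String (List String))
    (hnd : dB.keys.Nodup)
    (hrel : dA.items = dB.items.map (fun p => (p.1, PySem.List.dedup p.2))) :
    ((fun dk =>
       if kw ∈ dk.getD dom [] then dk else dk.insert dom (dk.getD dom [] ++ [kw]))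
      (if dA.contains dom then dA else dA.insert dom ([] : List String))).items
    = (dB.insert dom (dB.getD dom [] ++ [kw])).items.map (fun p => (p.1, PySem.List.dedup p.2)) := by
  have hkeys := pvKeys_eq dA dB hrel
  have hndA : dA.keys.Nodup := hkeys ▸ hnd
  by_cases hc : dB.contains dom = true
  · have hcA : dA.contains dom = true := by
      rw [PySem.Dict.contains_eq_decide_mem_keys, hkeys, ← PySem.Dict.contains_eq_decide_mem_keys]; exact hc
    have hmemk : dom ∈ dB.keys := (PySem.Dict.contains_iff_mem_keys _ _).mp hc
    obtain ⟨p, hp, hp1⟩ : ∃ p ∈ dB.items, p.1 = dom := by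
      simpa [PySem.Dict.keys] using hmemk
    have hpB : (dom, p.2) ∈ dB.items := by rw [← hp1]; exact hp
    have hgB : dB.getD dom [] = p.2 := PySem.Dict.getD_of_mem_items _ hpB hnd []
    have hpA : (dom, PySem.List.dedup p.2) ∈ dA.items := by
      rw [hrel]; exact List.mem_map.mpr ⟨(dom, p.2), hpB, rfl⟩
    have hgA : dA.getD dom [] = PySem.List.dedup p.2 := PySem.Dict.getD_of_mem_items _ hpA hndA []
    simp only [hcA, if_true, hgA]
    by_cases hk : kw ∈ p.2
    · have hmem : kw ∈ PySem.List.dedup p.2 := by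
        simp [PySem.List.dedup_eq_ofList, PySem.Set.mem_ofList, hk]
      simp only [hmem, if_true]
      rw [hrel, PySem.Dict.items_insert_of_contains _ _ hc, List.map_map]
      apply List.map_congr_left
      intro q hq
      by_cases hq1 : q.1 = dom
      · have hq2 : q.2 = p.2 := by
          have hmq : (dom, q.2) ∈ dB.items := by rw [← hq1]; exact hq
          have := PySem.Dict.getD_of_mem_items _ hmq hnd []
          rw [hgB] at this; exact this.symm
        have h1 : PySem.Set.ofList (p.2 ++ [kw]) = PySem.Set.ofList p.2 := by
          rw [PySem.Set.ofList_append_singleton,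
              PySem.Set.add_of_mem (by simpa [PySem.Set.mem_ofList] using hk)]
        simp [Function.comp, hq1, hq2, hgB, PySem.List.dedup_eq_ofList, h1]
      · simp [Function.comp, hq1]
    · have hknot : kw ∉ PySem.List.dedup p.2 := by
        simp [PySem.List.dedup_eq_ofList, PySem.Set.mem_ofList, hk]
      simp only [hknot, if_false]
      rw [PySem.Dict.items_insert_of_contains _ _ hcA, PySem.Dict.items_insert_of_contains _ _ hc,
          hrel, List.map_map, List.map_map]
      apply List.map_congr_left
      intro q hq
      by_cases hq1 : q.1 = dom
      · have h2 : PySem.Set.ofList (p.2 ++ [kw]) = PySem.Set.ofList p.2 ++ [kw] := by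
          rw [PySem.Set.ofList_append_singleton,
              PySem.Set.add_of_not_mem (by simpa [PySem.Set.mem_ofList] using hk)]
        simp [Function.comp, hq1, hgB, PySem.List.dedup_eq_ofList, h2]
      · simp [Function.comp, hq1]
  · have hcB : dB.contains dom = false := by simpa using hc
    have hcA : dA.contains dom = false := by
      rw [PySem.Dict.contains_eq_decide_mem_keys, hkeys, ← PySem.Dict.contains_eq_decide_mem_keys]
      exact hcB
    simp only [hcA, if_false, Bool.false_eq_true]
    rw [PySem.Dict.getD_insert_self]
    simp only [List.not_mem_nil, if_false]
    rw [PySem.Dict.insert_insert_self, List.nil_append,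
        PySem.Dict.items_insert_of_not_contains _ _ hcA,
        PySem.Dict.getD_of_not_contains _ _ hcB, List.nil_append,
        PySem.Dict.items_insert_of_not_contains _ _ hcB,
        hrel, List.map_append]
    have h3 : PySem.Set.ofList [kw] = [kw] := PySem.Set.ofList_eq_self_of_nodup [kw] (by simp)
    simp [PySem.List.dedup_eq_ofList, h3]

-- The whole loops: A's interleaved scan vs B's grouping scan, related by the same invariant.
theorem pvLoop_rel (l : List (List (String × String)))
    (dA dB : PySem.Dict String (List String))
    (hnd : dB.keys.Nodup)
    (hrel : dA.items = dB.items.map (fun p => (p.1, PySem.List.dedup p.2))) :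
    (l.foldl (fun dk item =>
      match (PySem.Dict.mk item).get? "domain", (PySem.Dict.mk item).get? "keyword" with
      | some domain, some keyword =>
        let dk := if dk.contains domain then dk else dk.insert domain ([] : List String)
        if keyword ∈ dk.getD domain [] then dk else dk.insert domain (dk.getD domain [] ++ [keyword])
      | _, _ => dk) dA).items
    = ((l.foldl (fun g item =>
      match (PySem.Dict.mk item).get? "domain" with
      | none => g
      | some domain =>
        match (PySem.Dict.mk item).get? "keyword" with
        | none => g
        | some keyword => g.insert domain (g.getD domain [] ++ [keyword])) dB)).items.map (fun p => (p.1, PySem.List.dedup p.2)) := by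
  induction l generalizing dA dB with
  | nil => simpa using hrel
  | cons item rest ih =>
    simp only [List.foldl_cons]
    cases hdm : (PySem.Dict.mk item).get? "domain" with
    | none => exact ih _ _ hnd hrel
    | some dom =>
      cases hkw : (PySem.Dict.mk item).get? "keyword" with
      | none => exact ih _ _ hnd hrel
      | some kw =>
        exact ih _ _ (PySem.Dict.nodup_keys_insert _ _ _ hnd) (pvStep_rel dom kw dA dB hnd hrel)

-- ===== VERDICT (by name: the statement is the Claim_ definition above) =====
theorem aggregate_keywords_by_domain_py_spec : Claim_equal_aggregate_keywords_by_domain_py := by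
  intro br _ _
  unfold Spec_aggregate_keywords_by_domain_py aggregate_keywords_by_domain_py aggregate_keywords_by_domain_py_alt
  exact pvLoop_rel _ PySem.Dict.empty PySem.Dict.empty (by simp [PySem.Dict.empty, PySem.Dict.keys]) rfl
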